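-- pv_equiv track=rewrite | github.com/CataBlazquez/TPO | TPO (1).py | Ubicacion_Actual_Personaje
-- ===== SOURCE A (Python) =====
-- def Ubicacion_Actual_Personaje(habitacion_actual):
--     direcciones = ("w", "s", "a", "d")
--     # Primero buscamos la posición actual del jugador (el número 1)
--     for fila in range(len(habitacion_actual)):
--         for col in range(len(habitacion_actual[fila])):
--             if habitacion_actual[fila][col] == 1:
--                 fila_jugador = fila
--                 col_jugador = col
--     # Coordenadas relativas a la posición actual
--     coordenadas = [
--         (fila_jugador- 1, col_jugador),  # adelante (W)
--         (fila_jugador + 1, col_jugador),  # atrás (S)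
--         (fila_jugador, col_jugador - 1),  # izquierda (A)
--         (fila_jugador, col_jugador + 1)   # derecha (D)
--     ]
--     ubicacion_actual=(fila_jugador, col_jugador)
--     return ubicacion_actual, coordenadas, direcciones
-- ===== SOURCE B (Python) =====
-- def Ubicacion_Actual_Personaje(habitacion_actual):
--     direcciones = ("w", "s", "a", "d")
--     # Reverse row-major scan: the first 1 found from the end is the last one
--     # a forward full scan would keep; return immediately.
--     for fila in range(len(habitacion_actual) - 1, -1, -1):
--         fila_actual = habitacion_actual[fila]
--         for col in range(len(fila_actual) - 1, -1, -1):
--             if fila_actual[col] == 1: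
--                 coordenadas = [
--                     (fila - 1, col),
--                     (fila + 1, col),
--                     (fila, col - 1),
--                     (fila, col + 1),
--                 ]
--                 return (fila, col), coordenadas, direcciones
--     raise ValueError("no hay jugador (ningun 1) en la habitacion")
-- ===== Notes on version B (the rewrite author's own statement) =====
-- stated objective: alternative
-- what changed: B scans the grid in reverse row-major order and returns at the first 1 found (the last one A's full overwrite-scan keeps), instead of scanning every cell and overwriting.
import Mathlib
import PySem

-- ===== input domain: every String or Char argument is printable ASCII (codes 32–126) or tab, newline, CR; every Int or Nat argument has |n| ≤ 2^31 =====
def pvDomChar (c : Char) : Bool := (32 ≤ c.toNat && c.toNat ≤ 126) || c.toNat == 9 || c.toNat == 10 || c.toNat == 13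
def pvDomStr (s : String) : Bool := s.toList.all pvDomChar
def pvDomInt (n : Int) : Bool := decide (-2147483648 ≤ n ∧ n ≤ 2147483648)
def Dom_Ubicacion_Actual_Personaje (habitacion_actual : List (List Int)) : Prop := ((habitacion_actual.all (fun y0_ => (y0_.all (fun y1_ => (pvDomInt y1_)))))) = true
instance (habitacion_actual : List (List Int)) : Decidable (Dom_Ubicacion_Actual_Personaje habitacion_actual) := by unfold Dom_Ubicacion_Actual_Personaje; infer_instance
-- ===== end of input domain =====

-- B replaces A's full overwrite-scan by a reverse row-major scan that returns at the
-- first 1 found (the last one A keeps); objective: alternative traversal with early exit, same result.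

-- ===== PORT A =====
-- A: full forward scan over all cells, overwriting (fila_jugador, col_jugador) at every 1.
-- The uninitialized-variable case (no 1 in the grid: Python raises UnboundLocalError)
-- is modelled by the Option state; Pre_ excludes the `none` case.
def Ubicacion_Actual_Personaje (habitacion_actual : List (List Int)) : (Int × Int) × (List (Int × Int)) × (String × String × String × String) :=
  let st :=
    (List.range habitacion_actual.length).foldl (fun st fila =>
      (List.range (habitacion_actual.getD fila []).length).foldl (fun st col =>
        if (habitacion_actual.getD fila []).getD col 0 = 1 then some (fila, col) else st) st)
      none
  match st with
  | some (fila_jugador, col_jugador) =>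
      ((fila_jugador, col_jugador),
       [((fila_jugador : Int) - 1, col_jugador),
        ((fila_jugador : Int) + 1, col_jugador),
        ((fila_jugador : Int), (col_jugador : Int) - 1),
        ((fila_jugador : Int), (col_jugador : Int) + 1)],
       ("w", "s", "a", "d"))
  | none => (((0 : Int), (0 : Int)), [], ("w", "s", "a", "d"))  -- unreachable under Pre_ (Python raises here)

-- ===== PORT B =====
-- B: scan one row from the last column down; first 1 found wins.
def pvColRev (row : List Int) : Nat → Option Nat
  | 0 => none
  | c + 1 => if row.getD c 0 = 1 then some c else pvColRev row c

-- B: scan rows from the last down; first row with a 1 wins.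
def pvRowRev (habitacion_actual : List (List Int)) : Nat → Option (Nat × Nat)
  | 0 => none
  | f + 1 =>
    match pvColRev (habitacion_actual.getD f []) (habitacion_actual.getD f []).length with
    | some c => some (f, c)
    | none => pvRowRev habitacion_actual f

def Ubicacion_Actual_Personaje_alt (habitacion_actual : List (List Int)) : (Int × Int) × (List (Int × Int)) × (String × String × String × String) :=
  match pvRowRev habitacion_actual habitacion_actual.length with
  | some (fila, col) =>
      ((fila, col),
       [((fila : Int) - 1, col),
        ((fila : Int) + 1, col),
        ((fila : Int), (col : Int) - 1),
        ((fila : Int), (col : Int) + 1)],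
       ("w", "s", "a", "d"))
  | none => (((0 : Int), (0 : Int)), [], ("w", "s", "a", "d"))  -- unreachable under Pre_ (Python raises here)

-- ===== PRECONDITION & SPEC =====
-- Pre_ excludes exactly the grids containing no 1: there Python A raises UnboundLocalError
-- (and Python B raises ValueError).
def Pre_Ubicacion_Actual_Personaje (habitacion_actual : List (List Int)) : Prop :=
  ∃ row ∈ habitacion_actual, (1 : Int) ∈ row
instance (habitacion_actual : List (List Int)) : Decidable (Pre_Ubicacion_Actual_Personaje habitacion_actual) := by unfold Pre_Ubicacion_Actual_Personaje; infer_instance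
def pvWitness_Ubicacion_Actual_Personaje : List (List Int) := [[0, 1], [0, 0]]
def Spec_Ubicacion_Actual_Personaje (habitacion_actual : List (List Int)) (out : (Int × Int) × (List (Int × Int)) × (String × String × String × String)) : Prop := out = Ubicacion_Actual_Personaje_alt habitacion_actual
instance (habitacion_actual : List (List Int)) (out : (Int × Int) × (List (Int × Int)) × (String × String × String × String)) : Decidable (Spec_Ubicacion_Actual_Personaje habitacion_actual out) := by unfold Spec_Ubicacion_Actual_Personaje; infer_instance

-- ===== CLAIM (what is proved, stated in full; the proofs are below) =====
def Claim_equal_Ubicacion_Actual_Personaje : Prop := ∀ (habitacion_actual : List (List Int)), Dom_Ubicacion_Actual_Personaje habitacion_actual → Pre_Ubicacion_Actual_Personaje habitacion_actual → Spec_Ubicacion_Actual_Personaje habitacion_actual (Ubicacion_Actual_Personaje habitacion_actual)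

-- ===== LEMMAS AND PROOFS =====

-- A's inner forward overwrite-fold over a row equals B's reverse column scan.
theorem pv_inner_eq (row : List Int) (fila : Nat) :
    ∀ (c : Nat) (st : Option (Nat × Nat)),
      (List.range c).foldl (fun st col => if row.getD col 0 = 1 then some (fila, col) else st) st
        = (match pvColRev row c with | some k => some (fila, k) | none => st) := by
  intro c
  induction c with
  | zero => intro st; simp [pvColRev]
  | succ n ih =>
    intro st
    rw [List.range_succ, List.foldl_append]
    simp only [List.foldl_cons, List.foldl_nil, pvColRev]
    split_ifs with h
    · rfl
    · exact ih st

-- A's outer forward overwrite-fold over the rows equals B's reverse row scan.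
theorem pv_outer_eq (g : List (List Int)) :
    ∀ (n : Nat) (st : Option (Nat × Nat)),
      (List.range n).foldl (fun st fila =>
          (List.range (g.getD fila []).length).foldl (fun st col =>
            if (g.getD fila []).getD col 0 = 1 then some (fila, col) else st) st) st
        = (match pvRowRev g n with | some p => some p | none => st) := by
  intro n
  induction n with
  | zero => intro st; simp [pvRowRev]
  | succ m ih =>
    intro st
    rw [List.range_succ, List.foldl_append]
    simp only [List.foldl_cons, List.foldl_nil]
    rw [pv_inner_eq]
    simp only [pvRowRev]
    cases h : pvColRev (g.getD m []) (g.getD m []).length with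
    | none => exact ih st
    | some c => rfl

-- ===== VERDICT (by name: the statement is the Claim_ definition above) =====
theorem Ubicacion_Actual_Personaje_spec : Claim_equal_Ubicacion_Actual_Personaje := by
  intro g _ _
  unfold Spec_Ubicacion_Actual_Personaje Ubicacion_Actual_Personaje Ubicacion_Actual_Personaje_alt
  rw [pv_outer_eq]
  cases h : pvRowRev g g.length with
  | none => rfl
  | some p => cases p; rfl
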